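-- pv_equiv track=rewrite | github.com/guillaumehuet/AdventOfCode | 2020/14_2/solve.py | getMask
-- ===== SOURCE A (Python) =====
-- def getMask(maskString):
--   maskOfMask = 0
--   mask = 0
--   for c in maskString:
--     maskOfMask <<= 1
--     mask <<= 1
--     if c in '01':
--       maskOfMask += 1
--       if c == '1':
--         mask += 1
--   return mask, maskOfMask
-- ===== SOURCE B (Python) =====
-- def getMask(maskString):
--     bits = ''.join('1' if c == '1' else '0' for c in maskString)
--     known = ''.join('1' if c in '01' else '0' for c in maskString)
--     return int('0' + bits, 2), int('0' + known, 2)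
-- ===== Notes on version B (the rewrite author's own statement) =====
-- stated objective: simpler
-- what changed: Instead of one manual shift-and-add loop over two accumulators, B builds two normalized binary strings (set bit / known bit as digits) and lets a base-2 int parse do the bit-weighting, with a leading zero digit so the empty string parses to 0.
import Mathlib
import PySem

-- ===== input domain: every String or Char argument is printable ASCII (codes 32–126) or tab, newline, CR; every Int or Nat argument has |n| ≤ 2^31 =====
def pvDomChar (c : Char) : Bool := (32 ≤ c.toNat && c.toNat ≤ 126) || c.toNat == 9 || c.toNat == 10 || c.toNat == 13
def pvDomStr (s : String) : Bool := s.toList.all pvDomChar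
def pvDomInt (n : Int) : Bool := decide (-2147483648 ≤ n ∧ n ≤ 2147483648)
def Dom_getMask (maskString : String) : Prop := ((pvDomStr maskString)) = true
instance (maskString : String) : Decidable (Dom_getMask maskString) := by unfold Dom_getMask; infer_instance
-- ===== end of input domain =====

-- B replaces A's manual shift-and-add loop over two accumulators by building two
-- normalized binary strings and parsing them with int(.,2); return values only, no mutation.

-- ===== PORT A =====
-- one pass; state = (mask, maskOfMask); shifts then conditional increments, branches in A's order
def getMask (maskString : String) : Int × Int :=
  let st := maskString.toList.foldl
    (fun (p : Int × Int) c =>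
      let maskOfMask := p.2 * 2      -- maskOfMask <<= 1
      let mask := p.1 * 2            -- mask <<= 1
      if c = '0' ∨ c = '1' then      -- c in '01'
        if c = '1' then (mask + 1, maskOfMask + 1)
        else (mask, maskOfMask + 1)
      else (mask, maskOfMask))
    (0, 0)
  (st.1, st.2)

-- ===== PORT B =====
-- int(s, 2): hand-ported base-2 parser; exact on strings of '0'/'1' chars, which is all B passes
def parseBin (s : List Char) : Int :=
  s.foldl (fun a c => a * 2 + (if c = '1' then 1 else 0)) 0

def getMask_alt (maskString : String) : Int × Int :=
  let bits := maskString.toList.map (fun c => if c = '1' then '1' else '0')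
  let known := maskString.toList.map (fun c => if c = '0' ∨ c = '1' then '1' else '0')
  (parseBin ('0' :: bits), parseBin ('0' :: known))

-- ===== PRECONDITION & SPEC =====
def Spec_getMask (maskString : String) (out : Int × Int) : Prop := out = getMask_alt maskString
instance (maskString : String) (out : Int × Int) : Decidable (Spec_getMask maskString out) := by unfold Spec_getMask; infer_instance

-- ===== CLAIM (what is proved, stated in full; the proofs are below) =====
def Claim_equal_getMask : Prop := ∀ (maskString : String), Dom_getMask maskString → Spec_getMask maskString (getMask maskString)

-- ===== LEMMAS AND PROOFS =====

-- A's paired fold equals B's two single-bit parses, for arbitrary accumulators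
theorem getMask_fold_eq (cs : List Char) : ∀ (m mm : Int),
    cs.foldl
      (fun (p : Int × Int) c =>
        let maskOfMask := p.2 * 2
        let mask := p.1 * 2
        if c = '0' ∨ c = '1' then
          if c = '1' then (mask + 1, maskOfMask + 1)
          else (mask, maskOfMask + 1)
        else (mask, maskOfMask))
      (m, mm)
    = ((cs.map (fun c => if c = '1' then '1' else '0')).foldl
         (fun a c => a * 2 + (if c = '1' then 1 else 0)) m,
       (cs.map (fun c => if c = '0' ∨ c = '1' then '1' else '0')).foldl
         (fun a c => a * 2 + (if c = '1' then 1 else 0)) mm) := by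
  induction cs with
  | nil => intro m mm; simp
  | cons c cs ih =>
    intro m mm
    simp only [List.foldl_cons, List.map_cons]
    by_cases h1 : c = '1'
    · simp [h1, ih]
    · by_cases h0 : c = '0' <;> simp [h0, h1, ih]

theorem getMask_spec' (s : String) : getMask s = getMask_alt s := by
  simp only [getMask, getMask_alt, parseBin, List.foldl_cons]
  rw [getMask_fold_eq]
  have h : ('0' : Char) ≠ '1' := by decide
  simp [h]

-- ===== VERDICT (by name: the statement is the Claim_ definition above) =====
theorem getMask_spec : Claim_equal_getMask := by
  intro s _
  exact getMask_spec' s
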